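-- pv_equiv track=rewrite | github.com/Libonet/4EnLinea | prototipo.py | completarTableroEnOrden
-- ===== SOURCE A (Python) =====
-- def soltarFichaEnColumna(ficha, columna, tablero):
--     for fila in range(6, 0, -1):
--         if tablero[fila-1][columna-1] == 0:
--             tablero[fila-1][columna-1] = ficha
--             return
--
-- def completarTableroEnOrden(secuencia, tablero):
--     ficha = 1
--     for columna in secuencia:
--         soltarFichaEnColumna(ficha, columna, tablero)
--         if ficha == 1:
--             ficha = 2
--         else:
--             ficha = 1
--     return tablero
-- ===== SOURCE B (Python) =====
-- def completarTableroEnOrden(secuencia, tablero):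
--     # One pass per column: precompute (lazily) the list of empty-row indices
--     # bottom-first, then each drop places in O(1) instead of rescanning 6 rows.
--     # Mutates tablero in place, like the original.
--     slots = {}
--     for i, columna in enumerate(secuencia):
--         c = columna - 1
--         if c not in slots:
--             slots[c] = [r for r in range(5, -1, -1) if tablero[r][c] == 0]
--         filas = slots[c]
--         if filas:
--             tablero[filas.pop(0)][c] = 1 + i % 2
--     return tablero
-- ===== Notes on version B (the rewrite author's own statement) =====
-- stated objective: faster
-- what changed: Instead of rescanning six rows on every drop, B lazily precomputes per column the list of empty-row indices (bottom-first) and places each piece in O(1) by popping that list, skipping exhausted columns.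
import Mathlib
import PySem

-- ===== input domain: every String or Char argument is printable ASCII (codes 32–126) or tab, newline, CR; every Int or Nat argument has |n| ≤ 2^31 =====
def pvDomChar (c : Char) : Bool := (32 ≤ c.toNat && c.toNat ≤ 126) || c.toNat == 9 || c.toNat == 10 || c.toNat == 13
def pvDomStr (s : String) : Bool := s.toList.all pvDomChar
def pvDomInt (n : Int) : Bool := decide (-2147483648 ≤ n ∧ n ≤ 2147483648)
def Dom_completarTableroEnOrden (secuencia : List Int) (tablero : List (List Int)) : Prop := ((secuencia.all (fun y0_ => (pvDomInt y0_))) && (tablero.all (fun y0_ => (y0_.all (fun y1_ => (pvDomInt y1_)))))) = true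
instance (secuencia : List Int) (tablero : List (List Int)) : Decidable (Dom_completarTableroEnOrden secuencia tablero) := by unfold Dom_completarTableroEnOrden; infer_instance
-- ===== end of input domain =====

-- B replaces A's six-row rescan per drop by a lazily built per-column list of empty
-- row indices, so each drop places in O(1); equivalence is about the RETURN value
-- (in Python both A and B mutate `tablero` in place in the same way).

-- ===== PORT A =====

-- tablero[r][c] (Python indexing; none = IndexError, excluded by Pre_)
def pvGet2 (tab : List (List Int)) (r c : Int) : Option Int :=
  (PySem.List.pyGet? tab r).bind fun row => PySem.List.pyGet? row c

-- tablero[r][c] = v (Python indexing; where Python would raise IndexError it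
-- no-ops — those inputs are excluded by Pre_)
def pvSet2 (tab : List (List Int)) (r c : Int) (v : Int) : List (List Int) :=
  match PySem.List.pyGet? tab r with
  | some row => PySem.List.pySetD tab r (PySem.List.pySetD row c v)
  | none => tab

-- the `for fila in range(6, 0, -1)` scan of soltarFichaEnColumna
def soltarGo (ficha columna : Int) (tablero : List (List Int)) : List Int → List (List Int)
  | [] => tablero
  | fila :: rest =>
    if pvGet2 tablero (fila - 1) (columna - 1) == some 0 then
      pvSet2 tablero (fila - 1) (columna - 1) ficha
    else
      soltarGo ficha columna tablero rest

def soltarFichaEnColumna (ficha columna : Int) (tablero : List (List Int)) : List (List Int) :=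
  soltarGo ficha columna tablero (PySem.List.pyRange 6 0 (-1))

-- the `for columna in secuencia` loop, state = (tablero, ficha)
def pvALoop : List Int → List (List Int) → Int → List (List Int)
  | [], tablero, _ => tablero
  | columna :: rest, tablero, ficha =>
    pvALoop rest (soltarFichaEnColumna ficha columna tablero) (if ficha == 1 then 2 else 1)

def completarTableroEnOrden (secuencia : List Int) (tablero : List (List Int)) : List (List Int) :=
  pvALoop secuencia tablero 1

-- ===== PORT B =====

-- `[r for r in range(5, -1, -1) if tablero[r][c] == 0]`
def zeroFilas (tab : List (List Int)) (c : Int) : List Int :=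
  (PySem.List.pyRange 5 (-1) (-1)).filter (fun r => pvGet2 tab r c == some 0)

-- the `for i, columna in enumerate(secuencia)` loop, state = (tablero, slots, i)
def pvBLoop : List Int → List (List Int) → PySem.Dict Int (List Int) → Int → List (List Int)
  | [], tablero, _, _ => tablero
  | columna :: rest, tablero, slots, i =>
    let c := columna - 1
    let slots1 := if slots.contains c then slots else slots.insert c (zeroFilas tablero c)
    match slots1.getD c [] with
    | [] => pvBLoop rest tablero slots1 (i + 1)
    | r :: filas =>
      pvBLoop rest (pvSet2 tablero r c (1 + PySem.Int.mod i 2)) (slots1.insert c filas) (i + 1)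

def completarTableroEnOrden_alt (secuencia : List Int) (tablero : List (List Int)) : List (List Int) :=
  pvBLoop secuencia tablero PySem.Dict.empty 0

-- ===== PRECONDITION & SPEC =====
-- Pre_ excludes (besides inputs where A raises IndexError: fewer than 6 rows, or a
-- scanned row shorter than the requested column) drops with nonpositive column
-- numbers — Python's negative-index wraparound can alias two column numbers to one
-- physical column, where rescanning A and B's per-key tables legitimately diverge —
-- and ragged boards on which A's scan stops at a zero before reaching a too-short
-- row while B's one-pass table build raises.
def Pre_completarTableroEnOrden (secuencia : List Int) (tablero : List (List Int)) : Prop :=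
  secuencia = [] ∨
    (6 ≤ tablero.length ∧
      ∀ columna ∈ secuencia, 1 ≤ columna ∧ ∀ row ∈ tablero.take 6, columna ≤ (row.length : Int))
instance (secuencia : List Int) (tablero : List (List Int)) : Decidable (Pre_completarTableroEnOrden secuencia tablero) := by unfold Pre_completarTableroEnOrden; infer_instance

def pvWitness_completarTableroEnOrden : List Int × List (List Int) :=
  ([1, 1, 1], [[0], [0], [0], [0], [0], [0]])

def Spec_completarTableroEnOrden (secuencia : List Int) (tablero : List (List Int)) (out : List (List Int)) : Prop := out = completarTableroEnOrden_alt secuencia tablero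
instance (secuencia : List Int) (tablero : List (List Int)) (out : List (List Int)) : Decidable (Spec_completarTableroEnOrden secuencia tablero out) := by unfold Spec_completarTableroEnOrden; infer_instance

-- ===== CLAIM (what is proved, stated in full; the proofs are below) =====
def Claim_equal_completarTableroEnOrden : Prop := ∀ (secuencia : List Int) (tablero : List (List Int)), Dom_completarTableroEnOrden secuencia tablero → Pre_completarTableroEnOrden secuencia tablero → Spec_completarTableroEnOrden secuencia tablero (completarTableroEnOrden secuencia tablero)

-- ===== LEMMAS AND PROOFS =====

-- a valid (0-based, nonnegative) column index for the six scanned rows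
def pvValidCol (tab : List (List Int)) (c : Int) : Prop :=
  0 ≤ c ∧ ∀ (k : Nat), k < 6 → (hk : k < tab.length) → c < (tab[k].length : Int)

-- every cached slot list is exactly the current empty-row list of a valid column
def pvInv (tab : List (List Int)) (slots : PySem.Dict Int (List Int)) : Prop :=
  ∀ c l, slots.get? c = some l → pvValidCol tab c ∧ l = zeroFilas tab c

theorem pvPyGet?_pos {α : Type} (xs : List α) (i : Int) (h0 : 0 ≤ i) (h : i < xs.length) :
    PySem.List.pyGet? xs i = some (xs[i.toNat]'(by omega)) := by
  have ht : i.toNat < xs.length := by omega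
  simp [PySem.List.pyGet?, PySem.List.pyIdx?, h0, h, ht]

theorem pvPyGet?_set_ne {α : Type} (xs : List α) (j : Nat) (v : α) (i : Int)
    (h0 : 0 ≤ i) (hne : i.toNat ≠ j) :
    PySem.List.pyGet? (xs.set j v) i = PySem.List.pyGet? xs i := by
  have hj : j ≠ i.toNat := by omega
  simp only [PySem.List.pyGet?, PySem.List.pyIdx?, List.length_set]
  by_cases hlt : i < (xs.length : Int) <;> simp [h0, hlt, List.getElem_set_ne hj]

-- A's scan over range(6,0,-1) finds exactly the head of zeroFilas
theorem pvSoltarGo_filter (ficha columna : Int) (tab : List (List Int)) (L : List Int) :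
    soltarGo ficha columna tab (L.map (· + 1)) =
      (match L.filter (fun r => pvGet2 tab r (columna - 1) == some 0) with
       | [] => tab
       | r :: _ => pvSet2 tab r (columna - 1) ficha) := by
  induction L with
  | nil => simp [soltarGo]
  | cons r rest ih =>
    have hr : r + 1 - 1 = r := by ring
    by_cases h : (pvGet2 tab r (columna - 1) == some 0) = true
    · simp [soltarGo, hr, h]
    · simp only [List.map_cons, soltarGo, hr, List.filter_cons, h, Bool.false_eq_true,
        ite_false, ih]

theorem pvSoltar_eq (ficha columna : Int) (tab : List (List Int)) :
    soltarFichaEnColumna ficha columna tab =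
      (match zeroFilas tab (columna - 1) with
       | [] => tab
       | r :: _ => pvSet2 tab r (columna - 1) ficha) := by
  have h6 : PySem.List.pyRange 6 0 (-1) = ([5, 4, 3, 2, 1, 0] : List Int).map (· + 1) := by decide
  have h5 : PySem.List.pyRange 5 (-1) (-1) = ([5, 4, 3, 2, 1, 0] : List Int) := by decide
  rw [soltarFichaEnColumna, h6, pvSoltarGo_filter]
  simp only [zeroFilas, h5]

-- popping the found cell from a filter over a Nodup list
theorem pvFilter_pop {L : List Int} {p p' : Int → Bool} {r : Int} {rest : List Int}
    (hnd : L.Nodup) (h : L.filter p = r :: rest) (hp'r : p' r = false)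
    (hagree : ∀ x ∈ L, x ≠ r → p' x = p x) : L.filter p' = rest := by
  induction L with
  | nil => simp at h
  | cons x L ih =>
    obtain ⟨hx, hnd'⟩ := List.nodup_cons.mp hnd
    by_cases hpx : p x = true
    · rw [List.filter_cons_of_pos hpx] at h
      injection h with h1 h2
      subst h1
      rw [List.filter_cons_of_neg (by simp [hp'r])]
      rw [List.filter_congr (fun y hy => hagree y (List.mem_cons_of_mem _ hy)
        (fun hyr => hx (hyr ▸ hy)))]
      exact h2
    · rw [List.filter_cons_of_neg (by simp [hpx])] at h
      have hxr : x ≠ r := by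
        rintro rfl
        exact hx (List.mem_of_mem_filter (h ▸ List.mem_cons_self (l := rest)))
      rw [List.filter_cons_of_neg (by simp [hagree x (List.mem_cons_self (l := L)) hxr, hpx])]
      exact ih hnd' h (fun y hy hyr => hagree y (List.mem_cons_of_mem _ hy) hyr)

theorem pvMod_succ (i : Int) : PySem.Int.mod (i + 1) 2 = 1 - PySem.Int.mod i 2 := by
  have a := PySem.Int.floordiv_mul_add_mod i 2
  have b := PySem.Int.floordiv_mul_add_mod (i + 1) 2
  have c1 := PySem.Int.mod_nonneg i (b := 2) (by omega)
  have c2 := PySem.Int.mod_lt i (b := 2) (by omega)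
  have d1 := PySem.Int.mod_nonneg (i + 1) (b := 2) (by omega)
  have d2 := PySem.Int.mod_lt (i + 1) (b := 2) (by omega)
  omega

theorem pvGet2_set_ne (tab : List (List Int)) (rn : Nat) (row' : List Int) (x c' : Int)
    (h0x : 0 ≤ x) (hx : x.toNat ≠ rn) :
    pvGet2 (tab.set rn row') x c' = pvGet2 tab x c' := by
  simp [pvGet2, pvPyGet?_set_ne tab rn row' x h0x hx]

theorem pvGet2_set_row (tab : List (List Int)) (r : Int) (row' : List Int) (c' : Int)
    (h0 : 0 ≤ r) (hr : r < (tab.length : Int)) :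
    pvGet2 (tab.set r.toNat row') r c' = PySem.List.pyGet? row' c' := by
  have h1 : r < (((tab.set r.toNat row').length : Nat) : Int) := by simp; omega
  rw [pvGet2, pvPyGet?_pos _ r h0 h1]
  simp [List.getElem_set_self (show r.toNat < (tab.set r.toNat row').length by simp; omega)]

theorem pvMain (sec : List Int) : ∀ (tab : List (List Int)) (slots : PySem.Dict Int (List Int)) (i ficha : Int),
    6 ≤ tab.length →
    (∀ col ∈ sec, 1 ≤ col ∧ ∀ (k : Nat), k < 6 → (hk : k < tab.length) → col ≤ (tab[k].length : Int)) →
    pvInv tab slots → ficha = 1 + PySem.Int.mod i 2 →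
    pvALoop sec tab ficha = pvBLoop sec tab slots i := by
  induction sec with
  | nil => intro tab slots i ficha _ _ _ _; rfl
  | cons columna rest ih =>
    intro tab slots i ficha hlen hsh hinv hficha
    obtain ⟨h1col, hcolsh⟩ := hsh columna List.mem_cons_self
    have hvc : pvValidCol tab (columna - 1) :=
      ⟨by omega, fun k hk6 hk => by have := hcolsh k hk6 hk; omega⟩
    have hshrest : ∀ col ∈ rest, 1 ≤ col ∧
        ∀ (k : Nat), k < 6 → (hk : k < tab.length) → col ≤ (tab[k].length : Int) :=
      fun col hcol => hsh col (List.mem_cons_of_mem _ hcol)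
    have hm0 := PySem.Int.mod_nonneg i (b := 2) (by omega)
    have hm1 := PySem.Int.mod_lt i (b := 2) (by omega)
    have hficha' : (if ficha == 1 then (2 : Int) else 1) = 1 + PySem.Int.mod (i + 1) 2 := by
      rw [pvMod_succ]
      have h01 : PySem.Int.mod i 2 = 0 ∨ PySem.Int.mod i 2 = 1 := by omega
      rcases h01 with h | h <;> rw [hficha, h] <;> norm_num
    have h5 : PySem.List.pyRange 5 (-1) (-1) = ([5, 4, 3, 2, 1, 0] : List Int) := by decide
    have hnd : ([5, 4, 3, 2, 1, 0] : List Int).Nodup := by decide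
    simp only [pvALoop, pvBLoop]
    set slots1 := (if slots.contains (columna - 1) then slots
        else slots.insert (columna - 1) (zeroFilas tab (columna - 1))) with hs1
    have hslots1 : slots1.get? (columna - 1) = some (zeroFilas tab (columna - 1)) := by
      rw [hs1]
      by_cases hcont : slots.contains (columna - 1)
      · rw [if_pos hcont]
        have hs : (slots.get? (columna - 1)).isSome := by
          rw [← PySem.Dict.contains_eq_isSome_get?]; exact hcont
        obtain ⟨l, hl⟩ := Option.isSome_iff_exists.mp hs
        rw [hl, (hinv _ _ hl).2]
      · rw [if_neg hcont, PySem.Dict.get?_insert_self]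
    have hinv1 : pvInv tab slots1 := by
      intro c' l' h'
      rw [hs1] at h'
      by_cases hcont : slots.contains (columna - 1)
      · rw [if_pos hcont] at h'; exact hinv c' l' h'
      · rw [if_neg hcont, PySem.Dict.get?_insert] at h'
        split at h'
        · rename_i hcc
          subst hcc
          injection h' with h''
          exact ⟨hvc, h''.symm⟩
        · exact hinv c' l' h'
    have hgetD : slots1.getD (columna - 1) [] = zeroFilas tab (columna - 1) := by
      rw [PySem.Dict.getD_eq_get?_getD, hslots1]; rfl
    rw [pvSoltar_eq, hgetD]
    cases hZ : zeroFilas tab (columna - 1) with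
    | nil =>
      exact ih tab slots1 (i + 1) _ hlen hshrest hinv1 hficha'
    | cons r filas =>
      have hrb : 0 ≤ r ∧ r ≤ 5 := by
        have hrmem : r ∈ zeroFilas tab (columna - 1) := by rw [hZ]; exact List.mem_cons_self
        have hrpy : r ∈ PySem.List.pyRange 5 (-1) (-1) := by
          rw [zeroFilas] at hrmem
          exact List.mem_of_mem_filter hrmem
        rw [h5] at hrpy
        simp at hrpy
        omega
      have hrlen : r < ((tab.length : Nat) : Int) := by omega
      have hrow := pvPyGet?_pos tab r hrb.1 hrlen
      have hclen : columna - 1 < ((tab[r.toNat]'(by omega)).length : Int) :=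
        hvc.2 r.toNat (by omega) (by omega)
      have hset : ∀ v, pvSet2 tab r (columna - 1) v =
          tab.set r.toNat ((tab[r.toNat]'(by omega)).set (columna - 1).toNat v) := by
        intro v
        simp only [pvSet2, hrow]
        rw [PySem.List.pySetD_of_nonneg _ _ (by omega : (0 : Int) ≤ columna - 1),
            PySem.List.pySetD_of_nonneg _ _ hrb.1]
      have hlens : ∀ (k : Nat) (hk : k < tab.length),
          ((tab.set r.toNat ((tab[r.toNat]'(by omega)).set (columna - 1).toNat ficha))[k]'(by
            simpa using hk)).length = (tab[k]'hk).length := by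
        intro k hk
        by_cases hkr : k = r.toNat
        · subst hkr; simp
        · simp [List.getElem_set_ne (show r.toNat ≠ k from fun h => hkr h.symm)]
      have hfb : ficha = 1 ∨ ficha = 2 := by omega
      have hget_self : pvGet2 (tab.set r.toNat ((tab[r.toNat]'(by omega)).set
          (columna - 1).toNat ficha)) r (columna - 1) = some ficha := by
        rw [pvGet2_set_row _ _ _ _ hrb.1 hrlen]
        rw [pvPyGet?_pos _ _ (by omega : (0 : Int) ≤ columna - 1)
          (by simp only [List.length_set]; omega)]
        simp
      have hinv' : pvInv (tab.set r.toNat ((tab[r.toNat]'(by omega)).set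
          (columna - 1).toNat ficha)) (slots1.insert (columna - 1) filas) := by
        intro c' l' h'
        rw [PySem.Dict.get?_insert] at h'
        split at h'
        · rename_i hcc
          injection h' with h''
          subst hcc
          refine ⟨⟨hvc.1, fun k hk6 hk => ?_⟩, ?_⟩
          · rw [hlens k (by simpa using hk)]
            exact hvc.2 k hk6 (by simpa using hk)
          · subst h''
            rw [zeroFilas, h5]
            refine (pvFilter_pop (r := r)
              (p := fun x => pvGet2 tab x (columna - 1) == some 0) hnd ?_ ?_ ?_).symm
            · rw [← h5, ← zeroFilas, hZ]
            · simp only [hget_self]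
              simp
              omega
            · intro x hx hxr
              have hxb : 0 ≤ x ∧ x ≤ 5 := by simp at hx; omega
              rw [pvGet2_set_ne _ _ _ _ _ hxb.1 (by omega)]
        · rename_i hcc
          obtain ⟨⟨h0c', hvl⟩, hzf⟩ := hinv1 c' l' h'
          refine ⟨⟨h0c', fun k hk6 hk => ?_⟩, ?_⟩
          · rw [hlens k (by simpa using hk)]
            exact hvl k hk6 (by simpa using hk)
          · rw [hzf, zeroFilas, zeroFilas, h5]
            refine (List.filter_congr ?_).symm
            intro x hx
            have hxb : 0 ≤ x ∧ x ≤ 5 := by simp at hx; omega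
            by_cases hxr : x.toNat = r.toNat
            · have hx' : x = r := by omega
              subst hx'
              rw [pvGet2_set_row _ _ _ _ hrb.1 hrlen]
              rw [pvPyGet?_set_ne _ _ _ _ h0c' (by omega)]
              simp [pvGet2, hrow]
            · rw [pvGet2_set_ne _ _ _ _ _ hxb.1 hxr]
      have hstep := ih (tab.set r.toNat ((tab[r.toNat]'(by omega)).set (columna - 1).toNat ficha))
        (slots1.insert (columna - 1) filas) (i + 1) _
        (by simpa using hlen)
        (fun col hcol => ⟨(hshrest col hcol).1, fun k hk6 hk => by
          rw [hlens k (by simpa using hk)]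
          exact (hshrest col hcol).2 k hk6 (by simpa using hk)⟩)
        hinv' hficha'
      show pvALoop rest (pvSet2 tab r (columna - 1) ficha) (if (ficha == 1) = true then 2 else 1) =
        pvBLoop rest (pvSet2 tab r (columna - 1) (1 + PySem.Int.mod i 2))
          (slots1.insert (columna - 1) filas) (i + 1)
      rw [← hficha, hset ficha]
      exact hstep

-- ===== VERDICT (by name: the statement is the Claim_ definition above) =====
theorem completarTableroEnOrden_spec : Claim_equal_completarTableroEnOrden := by
  intro sec tab _dom hpre
  unfold Spec_completarTableroEnOrden completarTableroEnOrden completarTableroEnOrden_alt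
  rcases hpre with h | ⟨hlen, hsh⟩
  · subst h; rfl
  · refine pvMain sec tab PySem.Dict.empty 0 1 hlen ?_ ?_ (by decide)
    · intro col hcol
      obtain ⟨h1, h2⟩ := hsh col hcol
      refine ⟨h1, fun k hk6 hk => ?_⟩
      have hmem : tab[k] ∈ tab.take 6 := by
        have : (tab.take 6)[k]'(by simp; omega) = tab[k] := List.getElem_take
        exact this ▸ List.getElem_mem _
      exact h2 _ hmem
    · intro c l hl
      simp [PySem.Dict.get?_empty] at hl
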